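-- pv_equiv track=rewrite | github.com/Jhordan1030/repo-anaalg | Trabajo3/Ejercicio3.py | suma_digitos_multiplo_recursivo
-- ===== SOURCE A (Python) =====
-- def suma_digitos_multiplo_recursivo(numero, n, indice=0, suma=0):
--     digitos = str(numero)
--
--     # Condición de salida: si hemos procesado todos los dígitos o si n llega a 0
--     if indice == len(digitos) or n == 0:
--         return suma
--
--     digito = int(digitos[indice])
--     if digito % n == 0:
--         suma += digito
--
--     # Llamada recursiva con índice incrementado y n decrementado
--     return suma_digitos_multiplo_recursivo(numero, n - 1, indice + 1, suma)
-- ===== SOURCE B (Python) =====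
-- def suma_digitos_multiplo_recursivo(numero, n, indice=0, suma=0):
--     digitos = str(numero)
--     for i in range(indice, len(digitos)):
--         cur = n - (i - indice)
--         if cur == 0:
--             break
--         d = int(digitos[i])
--         if d % cur == 0:
--             suma += d
--     return suma
-- ===== Notes on version B (the rewrite author's own statement) =====
-- stated objective: simpler
-- what changed: Replaces the tail recursion (which re-runs str(numero) on every call) with a single str() conversion and one explicit positional loop that derives the current divisor as n - (i - indice) and breaks when it reaches 0.
import Mathlib
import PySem

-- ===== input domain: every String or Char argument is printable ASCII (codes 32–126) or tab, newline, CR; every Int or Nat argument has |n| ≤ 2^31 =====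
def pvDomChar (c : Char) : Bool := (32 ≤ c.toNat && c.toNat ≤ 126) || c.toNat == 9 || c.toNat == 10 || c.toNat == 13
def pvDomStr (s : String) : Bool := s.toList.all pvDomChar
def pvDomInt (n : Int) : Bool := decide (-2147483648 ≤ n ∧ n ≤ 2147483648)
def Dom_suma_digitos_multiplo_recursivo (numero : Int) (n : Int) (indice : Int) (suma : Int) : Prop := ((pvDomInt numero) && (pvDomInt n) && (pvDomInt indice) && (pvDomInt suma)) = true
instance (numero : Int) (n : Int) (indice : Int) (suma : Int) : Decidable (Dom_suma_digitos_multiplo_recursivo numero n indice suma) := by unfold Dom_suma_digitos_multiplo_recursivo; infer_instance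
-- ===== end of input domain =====

-- B replaces A's tail recursion (which re-runs str(numero) on every call) with one str() conversion
-- and a single explicit positional loop; objective: simpler. Equivalence is about the return value.

-- ===== PORT A =====
-- Literal port of A. The recursion re-reads str(numero) each call, exactly as A does.
-- 'none' branches of pyGet?/ofChars? are where the Python raises (IndexError/ValueError);
-- those inputs are excluded by Pre_ below and the port just bails with the current suma.
def suma_digitos_multiplo_recursivo (numero : Int) (n : Int) (indice : Int) (suma : Int) : Int :=
  if indice = ((PySem.Int.toChars numero).length : Int) ∨ n = 0 then suma
  else
    match h : PySem.List.pyGet? (PySem.Int.toChars numero) indice with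
    | none => suma      -- Python: IndexError (outside Pre_)
    | some c =>
      match PySem.Int.ofChars? [c] with
      | none => suma    -- Python: ValueError on int('-') (outside Pre_)
      | some digito =>
        suma_digitos_multiplo_recursivo numero (n - 1) (indice + 1)
          (if PySem.Int.mod digito n = 0 then suma + digito else suma)
termination_by (((PySem.Int.toChars numero).length : Int) - indice).toNat
decreasing_by
  have h2 := PySem.List.pyGet?_eq_none_iff (xs := PySem.Int.toChars numero) (i := indice)
  have hin : PySem.Raise.InRange (PySem.Int.toChars numero).length indice := by
    by_contra hc
    rw [h2.mpr hc] at h; cases h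
  simp [PySem.Raise.InRange] at hin
  omega

-- ===== PORT B =====
-- B's loop body: iterate over the remaining index list (range(indice, len(digitos))),
-- cur = n - (i - indice), break on cur == 0.  'none' branches = Python raises, outside Pre_.
def sumaAltGo (digitos : List Char) (n : Int) (indice : Int) : List Int → Int → Int
  | [], suma => suma
  | i :: rest, suma =>
    if n - (i - indice) = 0 then suma     -- break
    else
      match PySem.List.pyGet? digitos i with
      | none => suma      -- Python: IndexError (outside Pre_)
      | some c =>
        match PySem.Int.ofChars? [c] with
        | none => suma    -- Python: ValueError (outside Pre_)
        | some d =>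
          sumaAltGo digitos n indice rest
            (if PySem.Int.mod d (n - (i - indice)) = 0 then suma + d else suma)

def suma_digitos_multiplo_recursivo_alt (numero : Int) (n : Int) (indice : Int) (suma : Int) : Int :=
  let digitos := PySem.Int.toChars numero
  sumaAltGo digitos n indice (PySem.List.pyRange indice (digitos.length : Int) 1) suma

-- ===== PRECONDITION & SPEC =====
-- Pre_ = exactly the inputs on which the Python A returns: n == 0 returns immediately; otherwise
-- indice must be a valid (possibly negative, wrapping) position or == len, and for negative numero
-- the '-' sign must not be reached before n counts down to 0 (else int('-') raises ValueError).
def Pre_suma_digitos_multiplo_recursivo (numero : Int) (n : Int) (indice : Int) (suma : Int) : Prop :=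
  n = 0 ∨
    (-((PySem.Int.toChars numero).length : Int) ≤ indice ∧
     indice ≤ ((PySem.Int.toChars numero).length : Int) ∧
     (0 ≤ numero ∨ 1 ≤ indice ∨
      (-((PySem.Int.toChars numero).length : Int) < indice ∧ indice < 0 ∧ 0 ≤ n ∧ n ≤ -indice)))
instance (numero : Int) (n : Int) (indice : Int) (suma : Int) : Decidable (Pre_suma_digitos_multiplo_recursivo numero n indice suma) := by unfold Pre_suma_digitos_multiplo_recursivo; infer_instance
def pvWitness_suma_digitos_multiplo_recursivo : Int × Int × Int × Int := (123, 2, 0, 0)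

def Spec_suma_digitos_multiplo_recursivo (numero : Int) (n : Int) (indice : Int) (suma : Int) (out : Int) : Prop := out = suma_digitos_multiplo_recursivo_alt numero n indice suma
instance (numero : Int) (n : Int) (indice : Int) (suma : Int) (out : Int) : Decidable (Spec_suma_digitos_multiplo_recursivo numero n indice suma out) := by unfold Spec_suma_digitos_multiplo_recursivo; infer_instance

-- ===== CLAIM (what is proved, stated in full; the proofs are below) =====
def Claim_equal_suma_digitos_multiplo_recursivo : Prop := ∀ (numero : Int) (n : Int) (indice : Int) (suma : Int), Dom_suma_digitos_multiplo_recursivo numero n indice suma → Pre_suma_digitos_multiplo_recursivo numero n indice suma → Spec_suma_digitos_multiplo_recursivo numero n indice suma (suma_digitos_multiplo_recursivo numero n indice suma)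

-- ===== LEMMAS AND PROOFS =====

-- Shifting (n, indice) together by (−1, +1) leaves every cur = n - (i - indice) unchanged.
lemma sumaAltGo_shift (digitos : List Char) (n indice : Int) (l : List Int) (suma : Int) :
    sumaAltGo digitos n indice l suma = sumaAltGo digitos (n - 1) (indice + 1) l suma := by
  induction l generalizing suma with
  | nil => rfl
  | cons i rest ih =>
    have hcur : n - 1 - (i - (indice + 1)) = n - (i - indice) := by ring
    simp only [sumaAltGo, hcur]
    split
    · rfl
    · split
      · rfl
      · split
        · rfl
        · exact ih _

-- A's recursion equals B's loop over range(indice, len), on ALL inputs (the bail branches agree).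
lemma suma_key (numero : Int) (n indice suma : Int) :
    suma_digitos_multiplo_recursivo numero n indice suma =
      sumaAltGo (PySem.Int.toChars numero) n indice
        (PySem.List.pyRange indice ((PySem.Int.toChars numero).length : Int) 1) suma := by
  rw [suma_digitos_multiplo_recursivo]
  by_cases hge : ((PySem.Int.toChars numero).length : Int) ≤ indice
  · rw [PySem.List.pyRange_one_eq_nil hge]
    by_cases hex : indice = ((PySem.Int.toChars numero).length : Int) ∨ n = 0
    · simp [hex, sumaAltGo]
    · simp only [hex, if_false]
      have hnone : PySem.List.pyGet? (PySem.Int.toChars numero) indice = none := by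
        apply (PySem.List.pyGet?_eq_none_iff _ _).mpr
        intro hc
        obtain ⟨h1, h2⟩ := hc
        omega
      split
      all_goals simp_all [sumaAltGo]
  · have hlt : indice < ((PySem.Int.toChars numero).length : Int) := lt_of_not_ge hge
    rw [PySem.List.pyRange_one_cons hlt]
    by_cases hn : n = 0
    · simp [hn, sumaAltGo]
    · have hne : ¬ (indice = ((PySem.Int.toChars numero).length : Int) ∨ n = 0) := by
        push_neg; exact ⟨by omega, hn⟩
      simp only [hne, if_false]
      have hcur : n - (indice - indice) = n := by ring
      cases hg : PySem.List.pyGet? (PySem.Int.toChars numero) indice with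
      | none => simp [sumaAltGo, hg, hn]
      | some c =>
        simp only [sumaAltGo, hcur, hg, hn, if_false]
        cases ho : PySem.Int.ofChars? [c] with
        | none => simp
        | some d =>
          show suma_digitos_multiplo_recursivo numero (n - 1) (indice + 1)
              (if PySem.Int.mod d n = 0 then suma + d else suma) = _
          rw [suma_key numero (n - 1) (indice + 1)]
          exact (sumaAltGo_shift (PySem.Int.toChars numero) n indice _ _).symm
termination_by (((PySem.Int.toChars numero).length : Int) - indice).toNat
decreasing_by omega

-- ===== VERDICT (by name: the statement is the Claim_ definition above) =====
theorem suma_digitos_multiplo_recursivo_spec : Claim_equal_suma_digitos_multiplo_recursivo := by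
  intro numero n indice suma _ _
  unfold Spec_suma_digitos_multiplo_recursivo suma_digitos_multiplo_recursivo_alt
  exact suma_key numero n indice suma
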